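-- pv_equiv track=rewrite | github.com/catcatAI/github-connect-quest | Unified-AI-Project-main/src/core_ai/lis/tonal_repair_engine.py | repair_output
-- ===== SOURCE A (Python) =====
-- def repair_output(original_text: str, issues: list) -> str:
--     """
--     Repairs the text based on the detected issues.
--     """
--     repaired_text = original_text
--     for issue in issues:
--         if issue == "repetitive":
--             repaired_text = " ".join(sorted(set(repaired_text.split()), key=repaired_text.split().index))
--         elif issue == "negative_sentiment":
--             repaired_text = f"I'm sorry to hear that. It sounds like you're saying: {repaired_text}"
--     return f"Repaired: {repaired_text}"
-- ===== SOURCE B (Python) =====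
-- def repair_output(original_text: str, issues: list) -> str:
--     """
--     Repairs the text based on the detected issues.
--     """
--     repaired_text = original_text
--     for issue in issues:
--         if issue == "repetitive":
--             # single linear pass: keep each word's first occurrence
--             seen = set()
--             kept = []
--             for word in repaired_text.split():
--                 if word not in seen:
--                     seen.add(word)
--                     kept.append(word)
--             repaired_text = " ".join(kept)
--         elif issue == "negative_sentiment":
--             repaired_text = f"I'm sorry to hear that. It sounds like you're saying: {repaired_text}"
--     return f"Repaired: {repaired_text}"
-- ===== Notes on version B (the rewrite author's own statement) =====
-- stated objective: simpler
-- what changed: The 'repetitive' branch's sorted(set(words), key=words.index) — a sort over quadratic repeated .index/.split scans — is replaced by one explicit left-to-right pass over the words with a seen-set, keeping each word's first occurrence.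
import Mathlib
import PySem

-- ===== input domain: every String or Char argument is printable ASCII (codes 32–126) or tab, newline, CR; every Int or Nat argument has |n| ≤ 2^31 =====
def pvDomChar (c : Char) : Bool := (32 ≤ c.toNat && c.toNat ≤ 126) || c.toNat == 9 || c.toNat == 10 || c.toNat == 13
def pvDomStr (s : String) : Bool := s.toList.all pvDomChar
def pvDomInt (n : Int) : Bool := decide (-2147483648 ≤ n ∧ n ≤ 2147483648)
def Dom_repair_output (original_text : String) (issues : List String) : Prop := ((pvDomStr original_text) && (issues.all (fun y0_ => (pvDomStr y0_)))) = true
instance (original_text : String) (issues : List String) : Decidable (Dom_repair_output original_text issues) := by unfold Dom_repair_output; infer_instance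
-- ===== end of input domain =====

-- B replaces A's sorted(set(words), key=words.index) with one linear left-to-right pass
-- keeping each word's first occurrence (objective: simpler — no sort, no repeated .index scans).

-- ===== PORT A =====
-- loop body of A's 'for issue in issues'
-- '.index' is exact here: every element of set(words) occurs in words, so the key never raises;
-- it is ported as (index? words w).getD 0, which equals words.index(w) for members.
def repairStepA (repaired_text : String) (issue : String) : String :=
  if issue = "repetitive" then
    PySem.Str.join " "
      (PySem.List.sorted (PySem.Set.ofList (PySem.Str.split₀ repaired_text))
        (fun w => (PySem.List.index? (PySem.Str.split₀ repaired_text) w).getD 0))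
  else if issue = "negative_sentiment" then
    "I'm sorry to hear that. It sounds like you're saying: " ++ repaired_text
  else repaired_text

def repair_output (original_text : String) (issues : List String) : String :=
  "Repaired: " ++ issues.foldl repairStepA original_text

-- ===== PORT B =====
-- inner loop body of B's dedup pass: state = (seen set, kept words)
def dedupStepB (st : PySem.Set String × List String) (word : String) : PySem.Set String × List String :=
  if PySem.Set.contains st.1 word then st else (PySem.Set.add st.1 word, st.2 ++ [word])

-- loop body of B's 'for issue in issues'
def repairStepB (repaired_text : String) (issue : String) : String :=
  if issue = "repetitive" then
    PySem.Str.join " " (((PySem.Str.split₀ repaired_text).foldl dedupStepB (PySem.Set.empty, [])).2)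
  else if issue = "negative_sentiment" then
    "I'm sorry to hear that. It sounds like you're saying: " ++ repaired_text
  else repaired_text

def repair_output_alt (original_text : String) (issues : List String) : String :=
  "Repaired: " ++ issues.foldl repairStepB original_text

-- ===== PRECONDITION & SPEC =====
def Spec_repair_output (original_text : String) (issues : List String) (out : String) : Prop := out = repair_output_alt original_text issues
instance (original_text : String) (issues : List String) (out : String) : Decidable (Spec_repair_output original_text issues out) := by unfold Spec_repair_output; infer_instance

-- ===== CLAIM (what is proved, stated in full; the proofs are below) =====
def Claim_equal_repair_output : Prop := ∀ (original_text : String) (issues : List String), Dom_repair_output original_text issues → Spec_repair_output original_text issues (repair_output original_text issues)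

-- ===== LEMMAS AND PROOFS =====

-- B's dedup loop, started at equal components (s, s), ends at (update s ws, update s ws)
lemma foldl_dedupStepB (ws : List String) : ∀ s : PySem.Set String,
    ws.foldl dedupStepB (s, s) = (PySem.Set.update s ws, PySem.Set.update s ws) := by
  induction ws with
  | nil => intro s; simp [PySem.Set.update]
  | cons w ws ih =>
    intro s
    have hstep : dedupStepB (s, s) w = (PySem.Set.add s w, PySem.Set.add s w) := by
      unfold dedupStepB PySem.Set.add
      split_ifs <;> rfl
    rw [List.foldl_cons, hstep, ih, PySem.Set.update_cons]

-- along set(ws) (first occurrences in order) the first-occurrence index strictly increases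
lemma pairwise_index_ofList (ws : List String) :
    (PySem.Set.ofList ws).Pairwise
      (fun a b => (PySem.List.index? ws a).getD 0 < (PySem.List.index? ws b).getD 0) := by
  induction ws with
  | nil => simp [PySem.Set.ofList]
  | cons x ws ih =>
    rw [PySem.Set.ofList_cons]
    constructor
    · intro b hb
      have hb' := List.mem_filter.mp hb
      have hbx : x ≠ b := by
        intro h; subst h; simp at hb'
      have hbw : b ∈ ws := (PySem.Set.mem_ofList ws b).mp hb'.1
      obtain ⟨k, hk⟩ := Option.isSome_iff_exists.mp ((PySem.List.index?_isSome_iff ws b).mpr hbw)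
      rw [PySem.List.index?_cons_self, PySem.List.index?_cons_of_ne ws hbx, hk]
      simp
    · have hsub : ((PySem.Set.ofList ws).discard x).Sublist (PySem.Set.ofList ws) :=
        List.filter_sublist
      refine (List.Pairwise.sublist hsub ih).imp_of_mem ?_
      intro a b ha hb hab
      have ha' := List.mem_filter.mp ha
      have hb' := List.mem_filter.mp hb
      have hax : x ≠ a := by intro h; subst h; simp at ha'
      have hbx : x ≠ b := by intro h; subst h; simp at hb'
      have haw : a ∈ ws := (PySem.Set.mem_ofList ws a).mp ha'.1
      have hbw : b ∈ ws := (PySem.Set.mem_ofList ws b).mp hb'.1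
      obtain ⟨ka, hka⟩ := Option.isSome_iff_exists.mp ((PySem.List.index?_isSome_iff ws a).mpr haw)
      obtain ⟨kb, hkb⟩ := Option.isSome_iff_exists.mp ((PySem.List.index?_isSome_iff ws b).mpr hbw)
      rw [PySem.List.index?_cons_of_ne ws hax, PySem.List.index?_cons_of_ne ws hbx, hka, hkb]
      rw [hka, hkb] at hab
      simpa using hab

-- the two loop bodies agree on every text and issue
lemma step_eq (repaired_text issue : String) :
    repairStepA repaired_text issue = repairStepB repaired_text issue := by
  unfold repairStepA repairStepB
  by_cases h1 : issue = "repetitive"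
  · simp only [h1, if_pos]
    have e0 : ((PySem.Set.empty : PySem.Set String), ([] : List String))
        = ((PySem.Set.empty : PySem.Set String), (PySem.Set.empty : PySem.Set String)) := rfl
    rw [e0, foldl_dedupStepB]
    exact congrArg (PySem.Str.join " ")
      (PySem.List.sorted_eq_of_perm_of_pairwise_lt _ _ _
        (List.Perm.refl _) (pairwise_index_ofList _))
  · simp only [if_neg h1]

-- ===== VERDICT (by name: the statement is the Claim_ definition above) =====
theorem repair_output_spec : Claim_equal_repair_output := by
  intro original_text issues _
  unfold Spec_repair_output repair_output repair_output_alt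
  have h : repairStepA = repairStepB := funext fun t => funext fun i => step_eq t i
  rw [h]
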